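-- pv_equiv track=rewrite | github.com/pbrook/aoc | 2022/22/main.py | tile_side
-- ===== SOURCE A (Python) =====
-- def tile_side(pos, i, sz):
--     x0, y0 = pos
--     x0 *= sz
--     y0 *= sz
--     if i == 0:
--         for y in range(y0, y0+sz):
--             yield (x0 + sz-1, y)
--     elif i == 1:
--         for x in range(x0+sz, x0, -1):
--             yield (x-1 , y0 + sz-1)
--     elif i == 2:
--         for y in range(y0+sz, y0, -1):
--             yield (x0, y-1)
--     elif i == 3:
--         for x in range(x0, x0+sz):
--             yield (x, y0)
--     else:
--         assert False
-- ===== SOURCE B (Python) =====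
-- def tile_side(pos, i, sz):
--     # Side 0 in tile-local coordinates is the column x = sz-1 walked upward;
--     # every other side is that same walk rotated by i quarter-turns of the tile,
--     # where one quarter-turn maps local (x, y) to (sz-1-y, x).
--     assert 0 <= i < 4
--     for k in range(sz):
--         x, y = sz - 1, k
--         for _ in range(i):
--             x, y = sz - 1 - y, x
--         yield (pos[0] * sz + x, pos[1] * sz + y)
-- ===== Notes on version B (the rewrite author's own statement) =====
-- stated objective: alternative
-- what changed: Instead of four separate directional range-loops, B generates only the canonical side 0 (the column x=sz-1 walked upward in tile-local coordinates) and obtains side i by applying i quarter-turn rotations (x,y)->(sz-1-y,x) to each point before translating by the tile origin.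
import Mathlib
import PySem

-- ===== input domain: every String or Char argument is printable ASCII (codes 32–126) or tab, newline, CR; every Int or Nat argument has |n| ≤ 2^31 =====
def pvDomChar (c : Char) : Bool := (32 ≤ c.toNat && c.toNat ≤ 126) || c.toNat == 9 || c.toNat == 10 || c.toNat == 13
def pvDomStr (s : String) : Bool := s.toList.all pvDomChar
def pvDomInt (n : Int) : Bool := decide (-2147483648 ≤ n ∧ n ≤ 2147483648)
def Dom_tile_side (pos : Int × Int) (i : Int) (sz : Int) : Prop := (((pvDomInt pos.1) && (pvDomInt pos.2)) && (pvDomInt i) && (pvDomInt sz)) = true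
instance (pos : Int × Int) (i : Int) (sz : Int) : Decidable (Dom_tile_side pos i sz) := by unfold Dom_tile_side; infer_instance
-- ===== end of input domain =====

-- B derives every side from the canonical side 0 (column x=sz-1 walked upward) by repeated quarter-turn rotation of tile-local coordinates, instead of four separate directional range-loops (simpler decomposition; same O(sz) cost).


-- ===== PORT A =====
def tile_side (pos : Int × Int) (i : Int) (sz : Int) : List (Int × Int) :=
  let x0 := pos.1 * sz
  let y0 := pos.2 * sz
  if i = 0 then (PySem.List.pyRange y0 (y0 + sz) 1).map (fun y => (x0 + sz - 1, y))
  else if i = 1 then (PySem.List.pyRange (x0 + sz) x0 (-1)).map (fun x => (x - 1, y0 + sz - 1))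
  else if i = 2 then (PySem.List.pyRange (y0 + sz) y0 (-1)).map (fun y => (x0, y - 1))
  else if i = 3 then (PySem.List.pyRange x0 (x0 + sz) 1).map (fun x => (x, y0))
  else []  -- assert False: the generator raises here; Pre_ excludes these i

-- ===== PORT B =====
-- one quarter-turn of tile-local coordinates: (x, y) ↦ (sz-1-y, x)
def pvRotQ (sz : Int) (p : Int × Int) : Int × Int := (sz - 1 - p.2, p.1)

-- B: point k of side i is point (sz-1, k) of side 0 rotated i quarter-turns ('for _ in range(i)'), then translated
def tile_side_alt (pos : Int × Int) (i : Int) (sz : Int) : List (Int × Int) :=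
  (PySem.List.pyRange 0 sz 1).map (fun k =>
    let p := (pvRotQ sz)^[i.toNat] (sz - 1, k)
    (pos.1 * sz + p.1, pos.2 * sz + p.2))

-- ===== PRECONDITION & SPEC =====
-- Pre_ excludes i outside 0..3, where both generators raise AssertionError on first iteration.
def Pre_tile_side (pos : Int × Int) (i : Int) (sz : Int) : Prop := i = 0 ∨ i = 1 ∨ i = 2 ∨ i = 3
instance (pos : Int × Int) (i : Int) (sz : Int) : Decidable (Pre_tile_side pos i sz) := by unfold Pre_tile_side; infer_instance
def pvWitness_tile_side : (Int × Int) × Int × Int := ((1, 2), 1, 4)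
def Spec_tile_side (pos : Int × Int) (i : Int) (sz : Int) (out : List (Int × Int)) : Prop := out = tile_side_alt pos i sz
instance (pos : Int × Int) (i : Int) (sz : Int) (out : List (Int × Int)) : Decidable (Spec_tile_side pos i sz out) := by unfold Spec_tile_side; infer_instance

-- ===== CLAIM (what is proved, stated in full; the proofs are below) =====
def Claim_equal_tile_side : Prop := ∀ (pos : Int × Int) (i : Int) (sz : Int), Dom_tile_side pos i sz → Pre_tile_side pos i sz → Spec_tile_side pos i sz (tile_side pos i sz)

-- ===== LEMMAS AND PROOFS =====

-- ===== VERDICT (by name: the statement is the Claim_ definition above) =====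
theorem tile_side_spec : Claim_equal_tile_side := by
  intro pos i sz _ hpre
  unfold Spec_tile_side tile_side tile_side_alt
  rcases hpre with h | h | h | h <;> subst h <;>
    simp [PySem.List.pyRange_one, PySem.List.pyRange_neg_one, pvRotQ,
      Function.iterate_succ, Function.iterate_zero, List.map_map] <;>
    (intro k _; omega)
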